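-- pv_equiv track=rewrite | github.com/ifnyas/gb2-k1a | quest 5.py | count_handshake
-- ===== SOURCE A (Python) =====
-- def count_handshake(num):
--   #reset counter 1st person
--   i = 0
--
--   #reset counter handshake
--   hs = 0
--
--   #start handshaking from the 1st person
--   while i < num:
--     #reset counter 2nd person
--     j = i + 1
--
--     #start handshaking to the 2nd person
--     while j < num:
--       #count handshake + 1
--       hs += 1
--
--       #to the next 2nd person
--       j += 1
--
--     #to the next 1st person
--     i += 1
--
--   #return count handshake
--   return hs
-- ===== SOURCE B (Python) =====
-- def count_handshake(num):
--   # closed form: number of unordered pairs among num people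
--   return num * (num - 1) // 2 if num > 0 else 0
-- ===== Notes on version B (the rewrite author's own statement) =====
-- stated objective: faster
-- what changed: replaced the nested counting loops by the closed-form pair count num*(num-1)//2 (0 for non-positive num)
import Mathlib
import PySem

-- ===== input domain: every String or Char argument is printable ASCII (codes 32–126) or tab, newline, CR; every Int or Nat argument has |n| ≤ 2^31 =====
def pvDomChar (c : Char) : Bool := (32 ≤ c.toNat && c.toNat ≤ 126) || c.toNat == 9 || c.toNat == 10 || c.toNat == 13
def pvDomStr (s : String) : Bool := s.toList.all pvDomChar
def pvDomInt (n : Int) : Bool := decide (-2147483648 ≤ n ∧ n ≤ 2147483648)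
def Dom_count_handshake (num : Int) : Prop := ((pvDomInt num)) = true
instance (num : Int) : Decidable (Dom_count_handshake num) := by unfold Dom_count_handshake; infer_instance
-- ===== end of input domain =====

-- B replaces A's nested counting loops by the closed-form pair count num*(num-1)//2 (0 for non-positive num): O(1) instead of O(num^2).


-- ===== PORT A =====
-- inner while loop: while j < num: hs += 1; j += 1
def chInner (num j hs : Int) : Int :=
  if h : j < num then chInner num (j + 1) (hs + 1) else hs
termination_by (num - j).toNat
decreasing_by omega

-- outer while loop: while i < num: j = i + 1; <inner>; i += 1
def chOuter (num i hs : Int) : Int :=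
  if h : i < num then chOuter num (i + 1) (chInner num (i + 1) hs) else hs
termination_by (num - i).toNat
decreasing_by omega

def count_handshake (num : Int) : Int := chOuter num 0 0

-- ===== PORT B =====
def count_handshake_alt (num : Int) : Int :=
  if num > 0 then PySem.Int.floordiv (num * (num - 1)) 2 else 0

-- ===== PRECONDITION & SPEC =====
def Spec_count_handshake (num : Int) (out : Int) : Prop := out = count_handshake_alt num
instance (num : Int) (out : Int) : Decidable (Spec_count_handshake num out) := by unfold Spec_count_handshake; infer_instance

-- ===== CLAIM (what is proved, stated in full; the proofs are below) =====
def Claim_equal_count_handshake : Prop := ∀ (num : Int), Dom_count_handshake num → Spec_count_handshake num (count_handshake num)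

-- ===== LEMMAS AND PROOFS =====

-- the inner loop adds max (num - j) 0 handshakes
theorem chInner_eq (num j hs : Int) : chInner num j hs = hs + max (num - j) 0 := by
  fun_induction chInner num j hs with
  | case1 j hs h ih => rw [ih]; omega
  | case2 j hs h => omega

-- triangular-number step: (k+1)*k/2 = k + k*(k-1)/2
theorem tri_step (k : Nat) : (k + 1) * (k + 1 - 1) / 2 = k + k * (k - 1) / 2 := by
  cases k with
  | zero => simp
  | succ m =>
    obtain ⟨t, ht⟩ : (2 : Nat) ∣ (m + 1) * m := (mul_comm m (m + 1)) ▸ (Nat.even_mul_succ_self m).two_dvd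
    have e1 : (m + 1 + 1) * (m + 1) = (m + 1) * m + 2 * (m + 1) := by ring
    simp only [Nat.add_sub_cancel]
    omega

-- the outer loop from i with k = (num - i).toNat people left adds k*(k-1)/2 handshakes
theorem chOuter_eq (num i hs : Int) :
    chOuter num i hs = hs + ((num - i).toNat * ((num - i).toNat - 1) / 2 : Nat) := by
  fun_induction chOuter num i hs with
  | case1 i hs h ih =>
      rw [ih, chInner_eq]
      have hk : (num - i).toNat = (num - (i + 1)).toNat + 1 := by omega
      rw [hk]
      rw [tri_step (num - (i + 1)).toNat]
      push_cast
      omega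
  | case2 i hs h =>
      have h0 : (num - i).toNat = 0 := by omega
      simp [h0]

-- ===== VERDICT (by name: the statement is the Claim_ definition above) =====
theorem count_handshake_spec : Claim_equal_count_handshake := by
  intro num _
  unfold Spec_count_handshake count_handshake count_handshake_alt
  rw [chOuter_eq]
  split_ifs with h
  · have hn : ((num.toNat : Nat) : Int) = num := by omega
    have h1 : ((num.toNat - 1 : Nat) : Int) = num - 1 := by omega
    have hm : num * (num - 1) = ((num.toNat * (num.toNat - 1) : Nat) : Int) := by
      rw [Nat.cast_mul, hn, h1]
    have hf : PySem.Int.floordiv (((num.toNat * (num.toNat - 1)) : Nat) : Int) 2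
        = ((num.toNat * (num.toNat - 1) / 2 : Nat) : Int) := by
      exact_mod_cast PySem.Int.floordiv_natCast (num.toNat * (num.toNat - 1)) 2
    have hz : (num - 0).toNat = num.toNat := by omega
    rw [hm, hf, hz]
    omega
  · have h0 : (num - 0).toNat = 0 := by omega
    rw [h0]
    simp
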